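-- pv_equiv track=rewrite | github.com/manu-gt-hub/candidates_screening_tool | utils/topic_pools.py | _resolve_pool
-- ===== SOURCE A (Python) =====
-- TOPIC_POOLS: dict[str, list[str]] = {
--     "data_engineer": [
--         "Data quality & validation",
--         "Pipeline construction & orchestration",
--         "Data architecture & modeling",
--         "Data skew & partitioning strategies",
--         "Performance optimization & tuning",
--         "Out-of-memory & resource management",
--         "Schema evolution & migrations",
--         "Real-time vs batch processing",
--         "Data governance & lineage",
--         "Testing & observability in data pipelines",
--     ],
--     "data_scientist": [
--         "Experiment design & A/B testing",
--         "Feature engineering & selection",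
--         "Model training & evaluation",
--         "Model deployment & monitoring",
--         "Statistical analysis & inference",
--         "Data quality & preprocessing",
--         "Time series & forecasting",
--         "NLP & unstructured data",
--         "Recommender systems",
--         "Explainability & bias detection",
--     ],
-- }
--
-- DEFAULT_POOL: list[str] = [
--     "System design & architecture",
--     "Data quality & validation",
--     "Performance optimization",
--     "Scalability & resource management",
--     "Testing & observability",
--     "Pipeline construction & orchestration",
--     "Real-time vs batch processing",
--     "Schema evolution & data modeling",
--     "Governance, security & compliance",
--     "Monitoring, alerting & incident response",
-- ]
--
-- def _resolve_pool(role: str | None) -> list[str]: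
--     """Return the topic pool for a given role (case-insensitive, fuzzy)."""
--     if not role:
--         return DEFAULT_POOL
--     role_lower = role.lower().replace("-", " ").replace("_", " ")
--     role_words = role_lower.split()
--     partial_match = None
--     for key, pool in TOPIC_POOLS.items():
--         key_norm = key.replace("_", " ")
--         key_words = set(key_norm.split())
--         # Exact match: all key words present or key phrase is a substring
--         if key_words.issubset(role_words) or key_norm in role_lower:
--             return pool
--         # Partial match: any meaningful key word in the role (first hit wins)
--         if partial_match is None:
--             for word in key_words:
--                 if word in role_lower and word not in ("data",):
--                     partial_match = pool
--                     break
--     return partial_match or DEFAULT_POOL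
-- ===== SOURCE B (Python) =====
-- TOPIC_POOLS: dict[str, list[str]] = {
--     "data_engineer": [
--         "Data quality & validation",
--         "Pipeline construction & orchestration",
--         "Data architecture & modeling",
--         "Data skew & partitioning strategies",
--         "Performance optimization & tuning",
--         "Out-of-memory & resource management",
--         "Schema evolution & migrations",
--         "Real-time vs batch processing",
--         "Data governance & lineage",
--         "Testing & observability in data pipelines",
--     ],
--     "data_scientist": [
--         "Experiment design & A/B testing",
--         "Feature engineering & selection",
--         "Model training & evaluation",
--         "Model deployment & monitoring",
--         "Statistical analysis & inference",
--         "Data quality & preprocessing",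
--         "Time series & forecasting",
--         "NLP & unstructured data",
--         "Recommender systems",
--         "Explainability & bias detection",
--     ],
-- }
--
-- DEFAULT_POOL: list[str] = [
--     "System design & architecture",
--     "Data quality & validation",
--     "Performance optimization",
--     "Scalability & resource management",
--     "Testing & observability",
--     "Pipeline construction & orchestration",
--     "Real-time vs batch processing",
--     "Schema evolution & data modeling",
--     "Governance, security & compliance",
--     "Monitoring, alerting & incident response",
-- ]
--
--
-- def _resolve_pool(role):
--     """Return the topic pool for a given role (case-insensitive, fuzzy)."""
--     if not role:
--         return DEFAULT_POOL
--     role_lower = role.lower().replace("-", " ").replace("_", " ")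
--     role_words = role_lower.split()
--     normalized = [(key.replace("_", " "), pool) for key, pool in TOPIC_POOLS.items()]
--     # First pass: exact match (all key words present, or key phrase a substring)
--     for key_norm, pool in normalized:
--         if all(w in role_words for w in key_norm.split()) or key_norm in role_lower:
--             return pool
--     # Second pass: first key with a meaningful word present in the role
--     for key_norm, pool in normalized:
--         if any(w in role_lower for w in key_norm.split() if w != "data"):
--             return pool
--     return DEFAULT_POOL
-- ===== Notes on version B (the rewrite author's own statement) =====
-- stated objective: simpler
-- what changed: Replaces A's single interleaved loop that carries a partial_match accumulator with two explicit passes over a pre-normalized key list: first pass returns the first exact match, second pass the first partial match, else the default pool.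
import Mathlib
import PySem

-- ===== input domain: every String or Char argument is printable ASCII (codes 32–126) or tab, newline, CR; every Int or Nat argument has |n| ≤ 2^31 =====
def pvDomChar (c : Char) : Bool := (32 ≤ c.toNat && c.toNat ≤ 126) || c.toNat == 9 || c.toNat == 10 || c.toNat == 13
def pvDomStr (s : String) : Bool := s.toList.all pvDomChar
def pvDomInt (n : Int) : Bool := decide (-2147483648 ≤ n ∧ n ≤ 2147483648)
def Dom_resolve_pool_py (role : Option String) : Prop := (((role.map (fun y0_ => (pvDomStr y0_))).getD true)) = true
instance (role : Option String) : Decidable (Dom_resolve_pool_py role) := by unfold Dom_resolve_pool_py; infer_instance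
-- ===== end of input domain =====

-- B resolves the role in two explicit passes (exact match, then partial match) over a
-- pre-normalized key list, instead of A's single interleaved loop with a stored partial match: simpler decomposition, same cost.


-- ===== PORT A =====
def pvEngineerPool : List String :=
  ["Data quality & validation", "Pipeline construction & orchestration",
   "Data architecture & modeling", "Data skew & partitioning strategies",
   "Performance optimization & tuning", "Out-of-memory & resource management",
   "Schema evolution & migrations", "Real-time vs batch processing",
   "Data governance & lineage", "Testing & observability in data pipelines"]

def pvScientistPool : List String :=
  ["Experiment design & A/B testing", "Feature engineering & selection",
   "Model training & evaluation", "Model deployment & monitoring",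
   "Statistical analysis & inference", "Data quality & preprocessing",
   "Time series & forecasting", "NLP & unstructured data",
   "Recommender systems", "Explainability & bias detection"]

def pvTopicPools : List (String × List String) :=
  [("data_engineer", pvEngineerPool), ("data_scientist", pvScientistPool)]

def pvDefaultPool : List String :=
  ["System design & architecture", "Data quality & validation",
   "Performance optimization", "Scalability & resource management",
   "Testing & observability", "Pipeline construction & orchestration",
   "Real-time vs batch processing", "Schema evolution & data modeling",
   "Governance, security & compliance", "Monitoring, alerting & incident response"]

-- the 'for key, pool in TOPIC_POOLS.items()' loop of A, carrying partial_match
def pvALoop (roleLower : String) (roleWords : List String) :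
    List (String × List String) → Option (List String) → List String
  | [], pm =>
      -- 'return partial_match or DEFAULT_POOL' (a pool is falsy only when empty)
      match pm with
      | some p => if p.isEmpty then pvDefaultPool else p
      | none => pvDefaultPool
  | (key, pool) :: rest, pm =>
      let keyNorm := PySem.Str.replace key "_" " "
      let keyWords : PySem.Set String := PySem.Set.ofList (PySem.Str.split₀ keyNorm)
      if keyWords.all (fun w => roleWords.contains w) || PySem.Str.isIn keyNorm roleLower then
        pool
      else
        let pm' :=
          if pm.isNone then
            -- inner 'for word in key_words: … break' (result is order-independent: only the hit's existence matters)
            match keyWords.find? (fun w => PySem.Str.isIn w roleLower && w != "data") with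
            | some _ => some pool
            | none => pm
          else pm
        pvALoop roleLower roleWords rest pm'

def resolve_pool_py (role : Option String) : List String :=
  match role with
  | none => pvDefaultPool
  | some r =>
    if r == "" then pvDefaultPool
    else
      let roleLower := PySem.Str.replace (PySem.Str.replace (PySem.Str.lower r) "-" " ") "_" " "
      let roleWords := PySem.Str.split₀ roleLower
      pvALoop roleLower roleWords pvTopicPools none

-- ===== PORT B =====
def pvNormalized : List (String × List String) :=
  pvTopicPools.map (fun kp => (PySem.Str.replace kp.1 "_" " ", kp.2))

def pvExact (roleLower : String) (roleWords : List String) (keyNorm : String) : Bool :=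
  (PySem.Str.split₀ keyNorm).all (fun w => roleWords.contains w) ||
    PySem.Str.isIn keyNorm roleLower

def pvPartial (roleLower : String) (keyNorm : String) : Bool :=
  (PySem.Str.split₀ keyNorm).any (fun w => w != "data" && PySem.Str.isIn w roleLower)

-- 'for …: if …: return pool' — the first hit's pool, or a fallback
def pvFirstPool (found : Option (String × List String)) (fallback : List String) : List String :=
  match found with
  | some kp => kp.2
  | none => fallback

def resolve_pool_py_alt (role : Option String) : List String :=
  match role with
  | none => pvDefaultPool
  | some r =>
    if r == "" then pvDefaultPool
    else
      let roleLower := PySem.Str.replace (PySem.Str.replace (PySem.Str.lower r) "-" " ") "_" " "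
      let roleWords := PySem.Str.split₀ roleLower
      pvFirstPool (pvNormalized.find? (fun kp => pvExact roleLower roleWords kp.1))
        (pvFirstPool (pvNormalized.find? (fun kp => pvPartial roleLower kp.1)) pvDefaultPool)

-- ===== PRECONDITION & SPEC =====
def Spec_resolve_pool_py (role : Option String) (out : List String) : Prop := out = resolve_pool_py_alt role
instance (role : Option String) (out : List String) : Decidable (Spec_resolve_pool_py role out) := by unfold Spec_resolve_pool_py; infer_instance

-- ===== CLAIM (what is proved, stated in full; the proofs are below) =====
def Claim_equal_resolve_pool_py : Prop := ∀ (role : Option String), Dom_resolve_pool_py role → Spec_resolve_pool_py role (resolve_pool_py role)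

-- ===== LEMMAS AND PROOFS =====
-- A's interleaved loop over the two concrete pool entries equals B's two find? passes
theorem pv_loop_eq (rl : String) (ws : List String) :
    pvALoop rl ws pvTopicPools none =
      pvFirstPool (pvNormalized.find? (fun kp => pvExact rl ws kp.1))
        (pvFirstPool (pvNormalized.find? (fun kp => pvPartial rl kp.1)) pvDefaultPool) := by
  have h1 : PySem.Str.replace "data_engineer" "_" " " = "data engineer" := by decide
  have h2 : PySem.Str.replace "data_scientist" "_" " " = "data scientist" := by decide
  have h3 : PySem.Str.split₀ "data engineer" = ["data", "engineer"] := by decide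
  have h4 : PySem.Str.split₀ "data scientist" = ["data", "scientist"] := by decide
  have h5 : (PySem.Set.ofList ["data", "engineer"] : PySem.Set String) = ["data", "engineer"] := by decide
  have h6 : (PySem.Set.ofList ["data", "scientist"] : PySem.Set String) = ["data", "scientist"] := by decide
  have h7 : (("data" : String) != "data") = false := by decide
  have h8 : (("engineer" : String) != "data") = true := by decide
  have h9 : (("scientist" : String) != "data") = true := by decide
  simp only [pvTopicPools, pvNormalized, pvALoop, pvExact, pvPartial, List.map, List.find?, pvFirstPool, h1, h2,
    h3, h4, h5, h6, h7, h8, h9, List.all_cons, List.all_nil, List.any_cons, List.any_nil,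
    Bool.and_false, Bool.false_and, Bool.and_true, Bool.or_false, Option.isNone_none, if_true]
  by_cases hm1 : "data" ∈ ws <;>
  by_cases hm2 : "engineer" ∈ ws <;>
  by_cases hm3 : "scientist" ∈ ws <;>
  cases hI1 : PySem.Chars.isIn "data engineer".toList rl.toList <;>
  cases hI2 : PySem.Chars.isIn "data scientist".toList rl.toList <;>
  cases hP1 : PySem.Chars.isIn "engineer".toList rl.toList <;>
  cases hP2 : PySem.Chars.isIn "scientist".toList rl.toList <;>
  simp_all [pvEngineerPool, pvScientistPool]

-- ===== VERDICT (by name: the statement is the Claim_ definition above) =====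
theorem resolve_pool_py_spec : Claim_equal_resolve_pool_py := by
  intro role _
  unfold Spec_resolve_pool_py
  cases role with
  | none => rfl
  | some r =>
    rw [resolve_pool_py, resolve_pool_py_alt]
    by_cases hc : ((r == "") = true)
    · rw [if_pos hc, if_pos hc]
    · rw [if_neg hc, if_neg hc]
      exact pv_loop_eq _ _
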